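-- pv_equiv track=rewrite | github.com/Nathan-Amburgey/Hangman-capstone-mini | app.py | getUserGuess
-- ===== SOURCE A (Python) =====
-- def getUserGuess(word, guessedIndices):
--     guess = ""
--     length = len(word)
--     for i in range(length):
--         if i in guessedIndices:
--             guess += " " + word[i]
--         else:
--             guess += ' _'
--     return guess
-- ===== SOURCE B (Python) =====
-- def getUserGuess(word, guessedIndices):
--     tokens = [' _'] * len(word)
--     for i in guessedIndices:
--         if 0 <= i < len(word):
--             tokens[i] = ' ' + word[i]
--     return ''.join(tokens)
-- ===== Notes on version B (the rewrite author's own statement) =====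
-- stated objective: simpler
-- what changed: Instead of scanning every position and testing membership in guessedIndices at each one, B seeds a token list with underscores, patches only the in-range guessed indices, and joins once.
import Mathlib
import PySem

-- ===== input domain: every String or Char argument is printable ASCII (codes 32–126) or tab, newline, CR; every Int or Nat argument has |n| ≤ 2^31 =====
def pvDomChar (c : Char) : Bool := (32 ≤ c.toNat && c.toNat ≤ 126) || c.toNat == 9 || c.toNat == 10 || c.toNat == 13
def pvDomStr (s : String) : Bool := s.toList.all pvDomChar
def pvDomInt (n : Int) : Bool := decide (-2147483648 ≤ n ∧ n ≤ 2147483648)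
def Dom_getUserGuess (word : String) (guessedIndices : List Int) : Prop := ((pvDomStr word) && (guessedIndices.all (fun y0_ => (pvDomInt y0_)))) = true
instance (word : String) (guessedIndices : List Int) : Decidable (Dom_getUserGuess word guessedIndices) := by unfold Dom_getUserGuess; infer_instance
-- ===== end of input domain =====

-- B replaces A's scan-all-positions-with-membership-test by seeding an underscore token list,
-- patching only the in-range guessed indices, and joining once (objective: simpler).


-- ===== PORT A =====
-- guess = ""; for i in range(len(word)): guess += " " + word[i] if i in guessedIndices else " _".
-- Strings are handled on the List Char side (PySem convention); word[i] is PySem.List.pyGetD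
-- on word.toList — exact here since every i produced by range(len(word)) is in range.
def getUserGuess (word : String) (guessedIndices : List Int) : String :=
  String.mk
    ((PySem.List.pyRange 0 (PySem.Str.len word) 1).foldl
      (fun guess i =>
        if guessedIndices.contains i then
          guess ++ [' ', PySem.List.pyGetD word.toList i ' ']
        else
          guess ++ [' ', '_'])
      [])

-- ===== PORT B =====
-- tokens = [' _'] * len(word); for i in guessedIndices: if 0 <= i < len(word): tokens[i] = ' ' + word[i];
-- return ''.join(tokens).  tokens[i] = … is PySem.List.pySetD (guarded in range), ''.join is PySem.Chars.join [].
def getUserGuess_alt (word : String) (guessedIndices : List Int) : String :=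
  String.mk
    (PySem.Chars.join []
      (guessedIndices.foldl
        (fun ts i =>
          if 0 ≤ i ∧ i < (word.toList.length : Int) then
            PySem.List.pySetD ts i [' ', PySem.List.pyGetD word.toList i ' ']
          else
            ts)
        (List.replicate word.toList.length [' ', '_'])))

-- ===== PRECONDITION & SPEC =====
def Spec_getUserGuess (word : String) (guessedIndices : List Int) (out : String) : Prop := out = getUserGuess_alt word guessedIndices
instance (word : String) (guessedIndices : List Int) (out : String) : Decidable (Spec_getUserGuess word guessedIndices out) := by unfold Spec_getUserGuess; infer_instance

-- ===== CLAIM (what is proved, stated in full; the proofs are below) =====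
def Claim_equal_getUserGuess : Prop := ∀ (word : String) (guessedIndices : List Int), Dom_getUserGuess word guessedIndices → Spec_getUserGuess word guessedIndices (getUserGuess word guessedIndices)

-- ===== LEMMAS AND PROOFS =====

-- the token contributed at position j, common to both sides
def pvTok (cs : List Char) (g : List Int) (j : Nat) : List Char :=
  if g.contains (j : Int) then [' ', cs.getD j ' '] else [' ', '_']

-- ''.join is flatten
theorem pv_join_nil_flatten (xss : List (List Char)) : PySem.Chars.join [] xss = xss.flatten := by
  induction xss with
  | nil => rfl
  | cons x t ih =>
    cases t with
    | nil => simp [PySem.Chars.join, List.intercalate]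
    | cons y s =>
      simp only [PySem.Chars.join, List.intercalate, List.intersperse] at *
      simp_all

-- A's loop is the flatten of the per-position tokens
theorem pvA_eq (word : String) (g : List Int) :
    getUserGuess word g = String.mk (((List.range word.toList.length).map (pvTok word.toList g)).flatten) := by
  unfold getUserGuess
  rw [PySem.Str.len_eq, PySem.List.pyRange_one]
  have h1 : (((word.toList.length : Int)) - 0).toNat = word.toList.length := by omega
  rw [h1]
  congr 1
  rw [List.foldl_map]
  have hfun : (fun (x : List Char) (y : Nat) =>
      if g.contains ((0 : Int) + (y : Int)) then x ++ [' ', PySem.List.pyGetD word.toList ((0 : Int) + (y : Int)) ' ']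
      else x ++ [' ', '_']) = fun x y => x ++ pvTok word.toList g y := by
    funext x y
    simp only [pvTok, zero_add, PySem.List.pyGetD_natCast]
    split <;> rfl
  rw [hfun, PySem.List.foldl_append_eq_flatMap]
  simp [List.flatMap]

-- B's patch loop: length is preserved and each final slot is pvTok (or the start slot if never hit)
theorem pvB_loop (cs : List Char) (g : List Int) (ts : List (List Char)) (hlen : ts.length = cs.length) :
    (g.foldl
        (fun ts i =>
          if 0 ≤ i ∧ i < (cs.length : Int) then
            PySem.List.pySetD ts i [' ', PySem.List.pyGetD cs i ' ']
          else ts) ts).length = cs.length ∧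
    ∀ j, j < cs.length →
      (g.foldl
        (fun ts i =>
          if 0 ≤ i ∧ i < (cs.length : Int) then
            PySem.List.pySetD ts i [' ', PySem.List.pyGetD cs i ' ']
          else ts) ts).getD j [] =
        if g.contains (j : Int) then [' ', cs.getD j ' '] else ts.getD j [] := by
  induction g generalizing ts with
  | nil => exact ⟨hlen, fun j _ => by simp⟩
  | cons i g ih =>
    simp only [List.foldl_cons]
    by_cases hi : 0 ≤ i ∧ i < (cs.length : Int)
    · rw [if_pos hi, PySem.List.pySetD_of_nonneg _ _ hi.1]
      have hset : (ts.set i.toNat [' ', PySem.List.pyGetD cs i ' ']).length = cs.length := by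
        simpa using hlen
      obtain ⟨hl, hv⟩ := ih _ hset
      refine ⟨hl, fun j hj => ?_⟩
      rw [hv j hj]
      by_cases hmem : g.contains (j : Int)
      · rw [if_pos hmem, if_pos (by simp_all)]
      · by_cases hij : i = (j : Int)
        · rw [if_neg hmem, if_pos (by simp [hij])]
          have hij' : i.toNat = j := by omega
          rw [List.getD_eq_getElem?_getD, List.getElem?_set, if_pos hij',
            if_pos (by omega : i.toNat < ts.length), Option.getD_some, hij,
            PySem.List.pyGetD_natCast, List.getD_eq_getElem?_getD]
        · rw [if_neg hmem, if_neg (by simp; exact ⟨fun h => hij (Eq.symm h), by simpa using hmem⟩)]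
          rw [List.getD_eq_getElem?_getD, List.getD_eq_getElem?_getD, List.getElem?_set,
            if_neg (by omega : ¬ i.toNat = j)]
    · rw [if_neg hi]
      obtain ⟨hl, hv⟩ := ih _ hlen
      refine ⟨hl, fun j hj => ?_⟩
      rw [hv j hj]
      have hij : ¬ (j : Int) = i := by omega
      by_cases hmem : g.contains (j : Int)
      · rw [if_pos hmem, if_pos (by simp; exact Or.inr (by simpa using hmem))]
      · rw [if_neg hmem, if_neg (by simp; exact ⟨hij, by simpa using hmem⟩)]

-- B's final token list is exactly the map of pvTok
theorem pvB_tokens (cs : List Char) (g : List Int) :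
    g.foldl
        (fun ts i =>
          if 0 ≤ i ∧ i < (cs.length : Int) then
            PySem.List.pySetD ts i [' ', PySem.List.pyGetD cs i ' ']
          else ts)
        (List.replicate cs.length [' ', '_'])
      = (List.range cs.length).map (pvTok cs g) := by
  obtain ⟨hl, hv⟩ := pvB_loop cs g (List.replicate cs.length [' ', '_']) (by simp)
  apply List.ext_getElem
  · rw [hl]; simp
  · intro j hj hj'
    have hjn : j < cs.length := by rw [hl] at hj; exact hj
    have h := hv j hjn
    rw [List.getD_eq_getElem?_getD, List.getElem?_eq_getElem hj, Option.getD_some] at h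
    rw [h]
    simp [pvTok, List.getD_eq_getElem?_getD, hjn]

theorem pvB_eq (word : String) (g : List Int) :
    getUserGuess_alt word g = String.mk (((List.range word.toList.length).map (pvTok word.toList g)).flatten) := by
  unfold getUserGuess_alt
  rw [pv_join_nil_flatten, pvB_tokens]

-- ===== VERDICT (by name: the statement is the Claim_ definition above) =====
theorem getUserGuess_spec : Claim_equal_getUserGuess := by
  intro word g _
  unfold Spec_getUserGuess
  rw [pvA_eq, pvB_eq]
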